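-- pv_equiv track=rewrite | github.com/yogeshPbawankar/Coding20_Yogesh_Bawankar | Array_Problem/stringWithHashInStart.py | removingHash
-- ===== SOURCE A (Python) =====
-- def removingHash(line):
--     count = 0
--     res = ""
--     for word in line :
--         if word == "#":
--             count += 1
--     i = 0
--
--     while i < count:
--         res += '#'
--         i += 1
--
--     line = line.split("#")
--     for word in line:
--         res += word
--
--     return res
-- ===== SOURCE B (Python) =====
-- def removingHash(line):
--     count = 0
--     body = []
--     for ch in line:
--         if ch == "#":
--             count += 1
--         else:
--             body.append(ch)
--     return "#" * count + "".join(body)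
-- ===== Notes on version B (the rewrite author's own statement) =====
-- stated objective: simpler
-- what changed: B fuses A's three separate passes (a counting loop, a while loop building the hash prefix, and a split-then-concatenate pass) into a single traversal that maintains the hash count and the non-hash body together, then returns the repeated hash prefix followed by the body.
import Mathlib
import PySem

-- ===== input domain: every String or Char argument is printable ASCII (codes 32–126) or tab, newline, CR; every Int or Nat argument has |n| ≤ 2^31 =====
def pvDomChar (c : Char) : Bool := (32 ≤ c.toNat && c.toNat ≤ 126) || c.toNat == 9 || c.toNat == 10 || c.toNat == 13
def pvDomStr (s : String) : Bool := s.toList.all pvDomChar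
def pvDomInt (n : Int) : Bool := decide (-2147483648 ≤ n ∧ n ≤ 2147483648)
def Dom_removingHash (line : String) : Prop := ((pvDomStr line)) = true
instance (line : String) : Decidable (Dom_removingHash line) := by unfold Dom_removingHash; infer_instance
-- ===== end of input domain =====

-- B fuses A's three passes (count loop, '#'-prefix while loop, split-and-concatenate loop)
-- into one traversal maintaining count and body together; equivalence of return values is proved.

-- ===== PORT A =====
-- the 'while i < count' loop of A, appending '#' each iteration
def removingHashWhile (i count : Int) (res : List Char) : List Char :=
  if i < count then removingHashWhile (i + 1) count (res ++ ['#']) else res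
termination_by (count - i).toNat
decreasing_by omega

def removingHash (line : String) : String :=
  let l := line.toList
  let count : Int := l.foldl (fun c w => if w == '#' then c + 1 else c) 0
  let res := removingHashWhile 0 count []
  let parts := PySem.Chars.splitOn l ['#']   -- line.split("#"); sep ≠ "" so split never raises
  String.mk (parts.foldl (fun r w => r ++ w) res)

-- ===== PORT B =====
-- single pass: count '#' and collect the other characters
def removingHashGo : List Char → Int → List Char → Int × List Char
  | [], count, body => (count, body)
  | c :: rest, count, body =>
      if c == '#' then removingHashGo rest (count + 1) body
      else removingHashGo rest count (body ++ [c])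

def removingHash_alt (line : String) : String :=
  let p := removingHashGo line.toList 0 []
  -- count ≥ 0 throughout, so '#'*count is exactly List.replicate p.1.toNat
  String.mk (List.replicate p.1.toNat '#' ++ p.2)

-- ===== PRECONDITION & SPEC =====
def Spec_removingHash (line : String) (out : String) : Prop := out = removingHash_alt line
instance (line : String) (out : String) : Decidable (Spec_removingHash line out) := by unfold Spec_removingHash; infer_instance

-- ===== CLAIM (what is proved, stated in full; the proofs are below) =====
def Claim_equal_removingHash : Prop := ∀ (line : String), Dom_removingHash line → Spec_removingHash line (removingHash line)

-- ===== LEMMAS AND PROOFS =====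

theorem countA_eq (l : List Char) (n : Int) :
    l.foldl (fun c w => if w == '#' then c + 1 else c) n = n + l.count '#' := by
  induction l generalizing n with
  | nil => simp
  | cons c rest ih =>
    simp only [List.foldl_cons, ih, List.count_cons]
    by_cases h : c = '#' <;> simp [h] <;> push_cast <;> ring

theorem whileA_eq (n : Nat) (i : Int) (res : List Char) :
    removingHashWhile i (i + n) res = res ++ List.replicate n '#' := by
  induction n generalizing i res with
  | zero => rw [removingHashWhile]; simp
  | succ k ih =>
    rw [removingHashWhile]
    have : i < i + (k + 1 : Nat) := by push_cast; omega
    simp only [this, if_true]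
    have h2 : (i : Int) + (k + 1 : Nat) = (i + 1) + (k : Nat) := by push_cast; ring
    rw [h2, ih]
    simp [List.replicate_succ]

theorem flatten_go (fuel : Nat) (l cur : List Char) (acc : List (List Char))
    (h : l.length < fuel) :
    (PySem.Chars.splitOn.go ['#'] fuel l cur acc).flatten
      = acc.reverse.flatten ++ cur.reverse ++ l.filter (fun c => !(c == '#')) := by
  induction fuel generalizing l cur acc with
  | zero => omega
  | succ f ih =>
    cases l with
    | nil => simp [PySem.Chars.splitOn.go]
    | cons c rest =>
      rw [PySem.Chars.splitOn.go]
      by_cases hc : c = '#'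
      · subst hc
        simp only [List.isPrefixOf, BEq.rfl, Bool.true_and, List.isPrefixOf_nil_left, if_true]
        rw [ih _ _ _ (by simpa using Nat.lt_of_succ_lt_succ h)]
        simp
      · have : (['#'].isPrefixOf (c :: rest)) = false := by
          simp [List.isPrefixOf]
          intro hh; exact hc hh.symm
        simp only [this, Bool.false_eq_true, if_false]
        rw [ih _ _ _ (by simpa using Nat.lt_of_succ_lt_succ h)]
        simp [hc, List.filter_cons]

theorem foldl_append_eq (parts : List (List Char)) (res : List Char) :
    parts.foldl (fun r w => r ++ w) res = res ++ parts.flatten := by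
  induction parts generalizing res with
  | nil => simp
  | cons p ps ih => simp [List.foldl, ih]

theorem bGo_eq (l : List Char) (count : Int) (body : List Char) :
    removingHashGo l count body = (count + l.count '#', body ++ l.filter (fun c => !(c == '#'))) := by
  induction l generalizing count body with
  | nil => simp [removingHashGo]
  | cons c rest ih =>
    by_cases hc : c = '#'
    · subst hc
      simp [removingHashGo, ih, List.count_cons, List.filter_cons]
      ring
    · simp [removingHashGo, hc, ih, List.count_cons, List.filter_cons]

-- ===== VERDICT (by name: the statement is the Claim_ definition above) =====
theorem removingHash_spec : Claim_equal_removingHash := by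
  intro line _
  unfold Spec_removingHash removingHash removingHash_alt
  simp only [countA_eq, bGo_eq]
  have hw := whileA_eq (line.toList.count '#') 0 []
  simp only [zero_add] at hw ⊢
  rw [hw, foldl_append_eq, PySem.Chars.splitOn,
      flatten_go _ _ _ _ (Nat.lt_succ_self _)]
  simp
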